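-- pv_equiv track=rewrite | github.com/arq-chrisb/AdventOfCode2020 | 010.py | search
-- ===== SOURCE A (Python) =====
-- def search(starting, adapters, path):
--     if not adapters:
--         # return the path with the 3 jolt built-in
--         return path + [starting + 3]
--     for adapter in adapters:
--         if adapter - starting <= 3:
--             return search(adapter, [a for a in adapters if a > adapter], path + [adapter])
--         # gap too big
--         else:
--             # return the path with the 3 jolt built-in
--             return path + [starting + 3]
-- ===== SOURCE B (Python) =====
-- def search(starting, adapters, path):
--     # Single left-to-right pass tracking the current joltage, instead of
--     # recursion that rebuilds a filtered adapter list each step.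
--     out = list(path)
--     cur = starting
--     if adapters:
--         a0 = adapters[0]
--         if a0 - starting <= 3:
--             out.append(a0)
--             cur = a0
--             for a in adapters[1:]:
--                 if a <= cur:
--                     continue  # A's filter would have dropped it
--                 if a - cur <= 3:
--                     out.append(a)
--                     cur = a
--                 else:
--                     break
--     return out + [cur + 3]
-- ===== Notes on version B (the rewrite author's own statement) =====
-- stated objective: alternative
-- what changed: Replaced A's recursion that rebuilds a filtered copy of the adapter list at every step with a single iterative left-to-right pass that tracks the current joltage and skips non-candidates in place, allocating no intermediate lists.
import Mathlib
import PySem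

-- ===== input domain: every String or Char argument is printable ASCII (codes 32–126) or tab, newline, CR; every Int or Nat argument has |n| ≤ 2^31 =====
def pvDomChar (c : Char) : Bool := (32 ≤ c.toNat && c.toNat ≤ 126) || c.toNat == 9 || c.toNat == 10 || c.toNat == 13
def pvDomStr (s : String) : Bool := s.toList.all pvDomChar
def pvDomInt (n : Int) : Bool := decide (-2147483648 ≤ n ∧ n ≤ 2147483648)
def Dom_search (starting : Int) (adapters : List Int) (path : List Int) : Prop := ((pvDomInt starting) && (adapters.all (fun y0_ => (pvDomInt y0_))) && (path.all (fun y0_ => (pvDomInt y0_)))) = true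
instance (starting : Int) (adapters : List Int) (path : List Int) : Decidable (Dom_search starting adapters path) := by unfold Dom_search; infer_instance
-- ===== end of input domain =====

-- B replaces A's recursion (which rebuilds a filtered copy of the adapter list each
-- step) with one iterative left-to-right pass tracking the current joltage (alternative).


-- ===== PORT A =====
-- literal transliteration of A: the for-loop returns on its first iteration,
-- so it is the head of the list; the recursion rebuilds the filtered list.
def search (starting : Int) (adapters : List Int) (path : List Int) : List Int :=
  match adapters with
  | [] => path ++ [starting + 3]
  | adapter :: tail =>
    if adapter - starting ≤ 3 then
      search adapter ((adapter :: tail).filter (fun a => decide (adapter < a))) (path ++ [adapter])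
    else
      path ++ [starting + 3]
termination_by adapters.length
decreasing_by
  have h := List.length_filter_le (fun a => decide (adapter < a)) tail
  simp
  omega

-- ===== PORT B =====
-- the single pass of Source B: cur is the current joltage, out the path built so far
def searchAltLoop (cur : Int) (xs : List Int) (out : List Int) : List Int :=
  match xs with
  | [] => out ++ [cur + 3]
  | a :: rest =>
    if a ≤ cur then searchAltLoop cur rest out
    else if a - cur ≤ 3 then searchAltLoop a rest (out ++ [a])
    else out ++ [cur + 3]

def search_alt (starting : Int) (adapters : List Int) (path : List Int) : List Int :=
  match adapters with
  | [] => path ++ [starting + 3]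
  | a0 :: rest =>
    if a0 - starting ≤ 3 then searchAltLoop a0 rest (path ++ [a0])
    else path ++ [starting + 3]

-- ===== PRECONDITION & SPEC =====
def Spec_search (starting : Int) (adapters : List Int) (path : List Int) (out : List Int) : Prop := out = search_alt starting adapters path
instance (starting : Int) (adapters : List Int) (path : List Int) (out : List Int) : Decidable (Spec_search starting adapters path out) := by unfold Spec_search; infer_instance

-- ===== CLAIM (what is proved, stated in full; the proofs are below) =====
def Claim_equal_search : Prop := ∀ (starting : Int) (adapters : List Int) (path : List Int), Dom_search starting adapters path → Spec_search starting adapters path (search starting adapters path)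

-- ===== LEMMAS AND PROOFS =====

theorem search_nil (s : Int) (out : List Int) : search s [] out = out ++ [s + 3] := by
  rw [search.eq_def]

theorem search_cons (s a : Int) (rest out : List Int) :
    search s (a :: rest) out =
      if a - s ≤ 3 then
        search a ((a :: rest).filter (fun x => decide (a < x))) (out ++ [a])
      else out ++ [s + 3] := by
  rw [search.eq_def]

-- the loop of B on xs computes what A computes on the filtered list
theorem loop_eq_search (xs : List Int) : ∀ (cur : Int) (out : List Int),
    searchAltLoop cur xs out = search cur (xs.filter (fun a => decide (cur < a))) out := by
  induction xs with
  | nil => intro cur out; simp [searchAltLoop, search_nil]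
  | cons a rest ih =>
    intro cur out
    by_cases hle : a ≤ cur
    · have hnlt : ¬ cur < a := not_lt.mpr hle
      simp only [searchAltLoop, List.filter_cons, hnlt, decide_false, if_pos hle,
        Bool.false_eq_true, if_false]
      exact ih cur out
    · have hlt : cur < a := lt_of_not_ge hle
      simp only [searchAltLoop, List.filter_cons, hlt, decide_true, if_neg hle, if_true]
      rw [search_cons]
      by_cases hgap : a - cur ≤ 3
      · rw [if_pos hgap, if_pos hgap, ih a (out ++ [a])]
        congr 1
        simp only [List.filter_cons, lt_irrefl, decide_false, Bool.false_eq_true, if_false,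
          List.filter_filter]
        apply List.filter_congr
        intro x _
        by_cases h : a < x
        · simp [h, lt_trans hlt h]
        · simp [h]
      · rw [if_neg hgap, if_neg hgap]

-- ===== VERDICT (by name: the statement is the Claim_ definition above) =====
theorem search_spec : Claim_equal_search := by
  intro starting adapters path _
  unfold Spec_search
  match adapters with
  | [] => simp [search_nil, search_alt]
  | a0 :: rest =>
    rw [search_cons]
    simp only [search_alt]
    by_cases hgap : a0 - starting ≤ 3
    · rw [if_pos hgap, if_pos hgap, loop_eq_search]
      congr 1
      simp
    · rw [if_neg hgap, if_neg hgap]
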